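-- pv_equiv track=rewrite | github.com/MustafaYounes1/py_w3resource | 034_DSA_heap_queue/017.py | heap_2_str
-- ===== SOURCE A (Python) =====
-- from math import floor, log
--
-- def heap_2_str(heap: list[...], max_lvl_width = 60, fill = " ") -> str:
--     """Tree-like string representation of a heap"""
--     res = ""
--
--     if not heap:
--         return res
--
--     last_lvl = -1
--     for i, n in enumerate(heap):
--         lvl = floor(log(i + 1, 2))  # row (tree level) index
--
--         if lvl != last_lvl:
--             res += '\n'
--
--         n_nodes = 2 ** lvl  # number of nodes in the current lvl
--         node_padding = floor(max_lvl_width / n_nodes)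
--
--         res += str(n).center(node_padding, fill)
--         last_lvl = lvl
--
--     return res.strip('\n')
-- ===== SOURCE B (Python) =====
-- def heap_2_str(heap, max_lvl_width=60, fill=" "):
--     """Tree-like string representation of a heap"""
--     if not heap:
--         return ""
--     lines = []
--     lvl = 0
--     rest = heap
--     while rest:
--         padding = max_lvl_width // 2 ** lvl
--         lines.append("".join(str(n).center(padding, fill) for n in rest[:2 ** lvl]))
--         rest = rest[2 ** lvl:]
--         lvl += 1
--     # trim newline padding at the edges (only non-trivial when fill is "\n")
--     return "\n".join(lines).strip("\n")
-- ===== Notes on version B (the rewrite author's own statement) =====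
-- stated objective: simpler
-- what changed: B walks the heap level by level, peeling off 2**lvl nodes per iteration and joining the per-level lines, instead of A's flat pass that computes floor(log(i+1,2)) per element and tracks the last level in mutable state.
import Mathlib
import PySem

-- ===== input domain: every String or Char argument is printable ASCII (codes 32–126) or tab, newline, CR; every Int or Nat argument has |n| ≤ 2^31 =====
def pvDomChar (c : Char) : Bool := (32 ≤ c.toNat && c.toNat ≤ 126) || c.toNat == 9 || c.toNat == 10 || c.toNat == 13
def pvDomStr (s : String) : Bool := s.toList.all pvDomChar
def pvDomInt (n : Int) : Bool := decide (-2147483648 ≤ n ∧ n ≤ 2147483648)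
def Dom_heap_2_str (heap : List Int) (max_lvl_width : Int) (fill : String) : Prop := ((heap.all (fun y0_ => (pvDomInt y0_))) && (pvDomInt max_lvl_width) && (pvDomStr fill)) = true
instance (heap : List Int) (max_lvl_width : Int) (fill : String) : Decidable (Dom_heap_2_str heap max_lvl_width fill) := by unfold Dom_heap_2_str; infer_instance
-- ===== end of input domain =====

-- B replaces A's flat pass (per-element floor(log(i+1,2)) + last-level state) by a level-by-level
-- peel of 2^lvl nodes per line; objective: simpler (no per-element logarithm, no mutable level state).


-- ===== PORT A =====
-- str(n).center(width, f): CPython's exact split (left = marg//2 + (marg & width & 1)); exact for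
-- a one-character fill, which Pre_ guarantees (otherwise Python raises TypeError).
def pyCenter (cs : List Char) (width : Int) (f : Char) : List Char :=
  if width ≤ (cs.length : Int) then cs
  else
    let marg := (width - cs.length).toNat
    let left := marg / 2 + (marg % 2) * (width.toNat % 2)
    List.replicate left f ++ cs ++ List.replicate (marg - left) f

-- loop body of A: state (res, last_lvl); lvl = floor(log(i+1,2)) ported as Nat.log 2 (i+1),
-- exact for every index below 2^48 (far beyond any list here); floor(max_lvl_width / 2**lvl) is
-- exact float division by a power of two, i.e. Python's //, ported as PySem.Int.floordiv.
def stepA (mlw : Int) (fc : Char) (st : List Char × Int) (p : Int × Int) : List Char × Int :=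
  let lvl : Int := (Nat.log 2 (p.1 + 1).toNat : Int)
  let res := if lvl ≠ st.2 then st.1 ++ ['\n'] else st.1
  let n_nodes : Int := (2 : Int) ^ lvl.toNat
  let node_padding := PySem.Int.floordiv mlw n_nodes
  (res ++ pyCenter (PySem.Int.toChars p.2) node_padding fc, lvl)

def heap_2_str (heap : List Int) (max_lvl_width : Int) (fill : String) : String :=
  if heap = [] then "" else
    let fc := fill.toList.getD 0 ' '     -- the single fill character (Pre_: len(fill) = 1)
    let st := (PySem.List.enumerate heap 0).foldl (stepA max_lvl_width fc) ([], -1)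
    String.ofList (PySem.Chars.stripChars st.1 ['\n'])

-- ===== PORT B =====
-- B's while loop: take 2^lvl nodes for this level's line, recurse on the rest.
def pyLvlLines (mlw : Int) (fc : Char) (lvl : Nat) (xs : List Int) : List (List Char) :=
  match xs with
  | [] => []
  | x :: rest =>
    let padding := PySem.Int.floordiv mlw ((2 : Int) ^ lvl)
    let line := ((x :: rest).take (2 ^ lvl)).foldl
      (fun acc n => acc ++ pyCenter (PySem.Int.toChars n) padding fc) []
    line :: pyLvlLines mlw fc (lvl + 1) ((x :: rest).drop (2 ^ lvl))
termination_by xs.length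
decreasing_by
  have h1 : 1 ≤ 2 ^ lvl := Nat.one_le_two_pow
  simp [List.length_drop]; omega

def heap_2_str_alt (heap : List Int) (max_lvl_width : Int) (fill : String) : String :=
  if heap = [] then "" else
    let fc := fill.toList.getD 0 ' '     -- the single fill character (Pre_: len(fill) = 1)
    String.ofList (PySem.Chars.stripChars
      (PySem.Chars.join ['\n'] (pyLvlLines max_lvl_width fc 0 heap)) ['\n'])

-- ===== PRECONDITION & SPEC =====
-- On a nonempty heap, str.center(_, fill) raises TypeError unless fill is exactly one character;
-- Pre_ excludes exactly those raising inputs (B calls center the same way and raises there too).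
def Pre_heap_2_str (heap : List Int) (max_lvl_width : Int) (fill : String) : Prop :=
  heap = [] ∨ PySem.Str.len fill = 1

instance (heap : List Int) (max_lvl_width : Int) (fill : String) : Decidable (Pre_heap_2_str heap max_lvl_width fill) := by unfold Pre_heap_2_str; infer_instance

def pvWitness_heap_2_str : List Int × Int × String := ([3, 7, 5, 11, 9], 12, " ")

def Spec_heap_2_str (heap : List Int) (max_lvl_width : Int) (fill : String) (out : String) : Prop := out = heap_2_str_alt heap max_lvl_width fill
instance (heap : List Int) (max_lvl_width : Int) (fill : String) (out : String) : Decidable (Spec_heap_2_str heap max_lvl_width fill out) := by unfold Spec_heap_2_str; infer_instance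

-- ===== CLAIM (what is proved, stated in full; the proofs are below) =====
def Claim_equal_heap_2_str : Prop := ∀ (heap : List Int) (max_lvl_width : Int) (fill : String), Dom_heap_2_str heap max_lvl_width fill → Pre_heap_2_str heap max_lvl_width fill → Spec_heap_2_str heap max_lvl_width fill (heap_2_str heap max_lvl_width fill)

-- ===== LEMMAS AND PROOFS =====

-- the centred rendering of one node at tree level lvl
def centf (mlw : Int) (fc : Char) (lvl : Nat) (n : Int) : List Char :=
  pyCenter (PySem.Int.toChars n) (PySem.Int.floordiv mlw ((2 : Int) ^ lvl)) fc

-- functional form of A's fold: at index k the newline fires iff k+1 is a power of two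
def bodyA (mlw : Int) (fc : Char) : Nat → List Int → List Char
  | _, [] => []
  | k, x :: xs =>
    (if k + 1 = 2 ^ Nat.log 2 (k + 1) then ['\n'] else []) ++
      centf mlw fc (Nat.log 2 (k + 1)) x ++ bodyA mlw fc (k + 1) xs

-- A's last_lvl before processing index k
def lvlState : Nat → Int
  | 0 => -1
  | k + 1 => (Nat.log 2 (k + 1) : Int)

theorem lvlCond (k : Nat) :
    ((Nat.log 2 (k + 1) : Int) ≠ lvlState k) ↔ k + 1 = 2 ^ Nat.log 2 (k + 1) := by
  cases k with
  | zero => simp [lvlState]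
  | succ k =>
    have hE : k + 1 + 1 = k + 2 := rfl
    rw [hE]
    simp only [lvlState, ne_eq, Int.natCast_inj]
    constructor
    · intro hne
      by_contra hpow
      have h1 : 2 ^ Nat.log 2 (k + 2) ≤ k + 2 := Nat.pow_log_le_self 2 (by omega)
      have h2 : k + 2 < 2 ^ (Nat.log 2 (k + 2) + 1) := Nat.lt_pow_succ_log_self (by norm_num) _
      have h4 : Nat.log 2 (k + 1) = Nat.log 2 (k + 2) :=
        Nat.log_eq_of_pow_le_of_lt_pow (by omega) (by omega)
      exact hne h4.symm
    · intro hpow hne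
      have hk1 : k + 1 < 2 ^ Nat.log 2 (k + 2) := by omega
      have := Nat.log_lt_of_lt_pow (by omega : k + 1 ≠ 0) hk1
      omega

theorem foldl_stepA (mlw : Int) (fc : Char) :
    ∀ (xs : List Int) (k : Nat) (res : List Char),
      ((PySem.List.enumerate xs (k : Int)).foldl (stepA mlw fc) (res, lvlState k)).1
        = res ++ bodyA mlw fc k xs := by
  intro xs
  induction xs with
  | nil => intro k res; simp [PySem.List.enumerate_nil, bodyA]
  | cons x xs ih =>
    intro k res
    rw [PySem.List.enumerate_cons]
    have htn : ((k : Int) + 1).toNat = k + 1 := by omega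
    simp only [List.foldl_cons]
    have hstep : stepA mlw fc (res, lvlState k) ((k : Int), x)
        = (res ++ ((if k + 1 = 2 ^ Nat.log 2 (k + 1) then ['\n'] else [])
            ++ centf mlw fc (Nat.log 2 (k + 1)) x), lvlState (k + 1)) := by
      simp only [stepA, htn, Int.toNat_natCast]
      by_cases hc : k + 1 = 2 ^ Nat.log 2 (k + 1)
      · rw [if_pos ((lvlCond k).mpr hc), if_pos hc]
        simp [centf, lvlState, List.append_assoc]
      · rw [if_neg (fun h => hc ((lvlCond k).mp h)), if_neg hc]
        simp [centf, lvlState]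
    rw [hstep]
    have hcast : ((k : Int) + 1) = ((k + 1 : Nat) : Int) := by push_cast; ring
    rw [hcast, ih (k + 1)]
    simp [bodyA, List.append_assoc]

theorem bodyA_append (mlw : Int) (fc : Char) :
    ∀ (l1 l2 : List Int) (k : Nat),
      bodyA mlw fc k (l1 ++ l2) = bodyA mlw fc k l1 ++ bodyA mlw fc (k + l1.length) l2 := by
  intro l1
  induction l1 with
  | nil => intro l2 k; simp [bodyA]
  | cons x l1 ih =>
    intro l2 k
    have h : k + (l1.length + 1) = k + 1 + l1.length := by omega
    simp only [List.cons_append, bodyA, List.length_cons, ih, List.append_assoc, h]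

-- strictly inside a level (2^lvl ≤ k, indices up to 2^(lvl+1)-2): no newline, constant level
theorem bodyA_inner (mlw : Int) (fc : Char) :
    ∀ (xs : List Int) (k lvl : Nat), 2 ^ lvl ≤ k → k + xs.length < 2 ^ (lvl + 1) →
      bodyA mlw fc k xs = (xs.map (centf mlw fc lvl)).flatten := by
  intro xs
  induction xs with
  | nil => intro k lvl _ _; simp [bodyA]
  | cons x xs ih =>
    intro k lvl hlo hhi
    simp only [List.length_cons] at hhi
    have hlog : Nat.log 2 (k + 1) = lvl :=
      Nat.log_eq_of_pow_le_of_lt_pow (by omega) (by omega)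
    have hnp : ¬ (k + 1 = 2 ^ lvl) := by omega
    simp only [bodyA, hlog, if_neg hnp, List.map_cons, List.flatten_cons, List.nil_append]
    rw [ih (k + 1) lvl (by omega) (by omega)]

-- unfolding of B's level loop
theorem pyLvlLines_nil (mlw : Int) (fc : Char) (lvl : Nat) :
    pyLvlLines mlw fc lvl [] = [] := by
  rw [pyLvlLines]

theorem pyLvlLines_cons (mlw : Int) (fc : Char) (lvl : Nat) (x : Int) (xs : List Int) :
    pyLvlLines mlw fc lvl (x :: xs)
      = (((x :: xs).take (2 ^ lvl)).foldl
          (fun acc n => acc ++ pyCenter (PySem.Int.toChars n)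
            (PySem.Int.floordiv mlw ((2 : Int) ^ lvl)) fc) [])
        :: pyLvlLines mlw fc (lvl + 1) ((x :: xs).drop (2 ^ lvl)) := by
  rw [pyLvlLines]

-- B's line for one level is the flatten of the centred nodes
theorem line_eq_flatten (mlw : Int) (fc : Char) (l : List Int) (p : Nat) :
    l.foldl (fun acc n => acc ++ pyCenter (PySem.Int.toChars n)
        (PySem.Int.floordiv mlw ((2 : Int) ^ p)) fc) []
      = (l.map (centf mlw fc p)).flatten := by
  rw [PySem.List.foldl_append_eq_flatMap]
  simp only [List.nil_append, List.flatMap_def]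
  rfl

theorem bodyA_levels (mlw : Int) (fc : Char) :
    ∀ (n : Nat) (xs : List Int) (lvl : Nat), xs.length ≤ n → xs ≠ [] →
      bodyA mlw fc (2 ^ lvl - 1) xs
        = '\n' :: PySem.Chars.join ['\n'] (pyLvlLines mlw fc lvl xs) := by
  intro n
  induction n with
  | zero => intro xs lvl hlen hne; cases xs with
    | nil => exact absurd rfl hne
    | cons x xs => simp at hlen
  | succ n ih =>
    intro xs lvl hlen hne
    cases xs with
    | nil => exact absurd rfl hne
    | cons x xs =>
      have h1 : 1 ≤ 2 ^ lvl := Nat.one_le_two_pow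
      have hp2 : 2 ^ (lvl + 1) = 2 * 2 ^ lvl := by ring
      have hsplit : x :: xs = (x :: xs).take (2 ^ lvl) ++ (x :: xs).drop (2 ^ lvl) :=
        (List.take_append_drop _ _).symm
      have htake : (x :: xs).take (2 ^ lvl) = x :: xs.take (2 ^ lvl - 1) := by
        conv_lhs => rw [show 2 ^ lvl = (2 ^ lvl - 1) + 1 from by omega]
        rw [List.take_succ_cons]
      have hlogpow : Nat.log 2 (2 ^ lvl) = lvl := Nat.log_pow (by norm_num) lvl
      have ht : (xs.take (2 ^ lvl - 1)).length ≤ 2 ^ lvl - 1 := by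
        rw [List.length_take]; exact min_le_left _ _
      have hk1 : 2 ^ lvl - 1 + 1 = 2 ^ lvl := by omega
      -- this level's chunk: newline at its head, then the centred nodes of the level
      have hchunk : bodyA mlw fc (2 ^ lvl - 1) ((x :: xs).take (2 ^ lvl))
          = '\n' :: (((x :: xs).take (2 ^ lvl)).map (centf mlw fc lvl)).flatten := by
        rw [htake]
        simp only [bodyA, hk1, hlogpow, if_true]
        rw [bodyA_inner mlw fc _ (2 ^ lvl) lvl (le_refl _) (by omega)]
        simp
      conv_lhs => rw [hsplit]
      rw [bodyA_append, hchunk, pyLvlLines_cons, line_eq_flatten]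
      cases hd : (x :: xs).drop (2 ^ lvl) with
      | nil =>
        -- last level: nothing after the chunk
        simp only [bodyA, List.append_nil]
        rw [pyLvlLines_nil, PySem.Chars.join_singleton]
      | cons y ys =>
        -- a further level follows: the chunk is full, recurse on the rest
        have hxl : 2 ^ lvl ≤ (x :: xs).length := by
          by_contra hlt
          have : (x :: xs).drop (2 ^ lvl) = [] := List.drop_eq_nil_of_le (by omega)
          rw [hd] at this; exact absurd this (by simp)
        have hlen_take : ((x :: xs).take (2 ^ lvl)).length = 2 ^ lvl := by
          simp only [List.length_take]; omega
        have hidx : 2 ^ lvl - 1 + ((x :: xs).take (2 ^ lvl)).length = 2 ^ (lvl + 1) - 1 := by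
          rw [hlen_take]; omega
        have hlc : (x :: xs).length = xs.length + 1 := by simp
        have hld : ((x :: xs).drop (2 ^ lvl)).length = (x :: xs).length - 2 ^ lvl := by
          simp [List.length_drop]
        have hrec := ih ((x :: xs).drop (2 ^ lvl)) (lvl + 1) (by omega) (by rw [hd]; simp)
        rw [hd] at hrec
        rw [hidx, hrec]
        cases hll2 : pyLvlLines mlw fc (lvl + 1) (y :: ys) with
        | nil => rw [pyLvlLines_cons] at hll2; exact absurd hll2 (by simp)
        | cons L Ls =>
          rw [PySem.Chars.join_cons_cons]
          simp [List.append_assoc]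

-- ===== VERDICT (by name: the statement is the Claim_ definition above) =====
theorem heap_2_str_spec : Claim_equal_heap_2_str := by
  intro heap mlw fill _hdom _hpre
  unfold Spec_heap_2_str heap_2_str heap_2_str_alt
  cases heap with
  | nil => simp
  | cons x xs =>
    simp only [if_neg (by simp : ¬(x :: xs = ([] : List Int)))]
    have hfold := foldl_stepA mlw (fill.toList.getD 0 ' ') (x :: xs) 0 []
    rw [show ((0 : Nat) : Int) = (0 : Int) from rfl,
        show lvlState 0 = (-1 : Int) from rfl, List.nil_append] at hfold
    have hbody := bodyA_levels mlw (fill.toList.getD 0 ' ') (x :: xs).length (x :: xs) 0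
      (le_refl _) (by simp)
    rw [show (2 : Nat) ^ 0 - 1 = 0 from rfl] at hbody
    rw [hfold, hbody]
    simp [PySem.Chars.stripChars]
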